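-- pv_equiv track=rewrite | github.com/phemps/ai-assisted-workflows | shared/analyzers/security/detect_secrets_analyzer.py | _should_include_secret
-- ===== SOURCE A (Python) =====
-- from typing import Any, Optional
--
-- def _should_include_secret(secret: dict[str, Any], file_path: str) -> bool:
--     """Apply custom filtering to reduce false positives while preserving legitimate secrets."""
--     secret_type = secret.get("type", "")
--
--     # Always include high-value secret types
--     high_value_types = [
--         "Private Key",
--         "AWS Access Key",
--         "GitHub Token",
--         "JWT Token",
--     ]
--     if secret_type in high_value_types:
--         return True
--
--     # For keyword secrets, apply balanced filtering
--     if secret_type == "Secret Keyword":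
--         # Exclude obvious test files but allow legitimate secrets in vulnerable apps
--         if any(
--             pattern in file_path.lower()
--             for pattern in [
--                 "test_",
--                 "mock_",
--                 "example_only",
--                 "demo_data",
--                 "fixture_",
--             ]
--         ):
--             return False
--
--         # Allow secrets in vulnerable apps (this is expected for our test)
--         if any(app in file_path for app in ["pygoat", "nodegoat", "sql-vulns"]):
--             return True
--
--     return True  # Include by default
-- ===== SOURCE B (Python) =====
-- from typing import Any
--
-- def _should_include_secret(secret: dict[str, Any], file_path: str) -> bool:
--     """Include every secret except keyword hits in obvious test/demo files.
--
--     Single left-to-right scan of the lowered path: at each index check whether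
--     one of the exclusion markers starts there (instead of five separate
--     substring searches over the whole path).
--     """
--     if secret.get("type", "") != "Secret Keyword":
--         return True
--     markers = ("test_", "mock_", "example_only", "demo_data", "fixture_")
--     path = file_path.lower()
--     for i in range(len(path)):
--         if path.startswith(markers, i):
--             return False
--     return True
-- ===== Notes on version B (the rewrite author's own statement) =====
-- stated objective: alternative
-- what changed: A's dead allowlist branches are dropped and the five independent substring-containment scans are replaced by one left-to-right scan of the lowered path that checks at each index whether any exclusion marker starts there (str.startswith with an index), exiting early on the first hit.
import Mathlib
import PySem

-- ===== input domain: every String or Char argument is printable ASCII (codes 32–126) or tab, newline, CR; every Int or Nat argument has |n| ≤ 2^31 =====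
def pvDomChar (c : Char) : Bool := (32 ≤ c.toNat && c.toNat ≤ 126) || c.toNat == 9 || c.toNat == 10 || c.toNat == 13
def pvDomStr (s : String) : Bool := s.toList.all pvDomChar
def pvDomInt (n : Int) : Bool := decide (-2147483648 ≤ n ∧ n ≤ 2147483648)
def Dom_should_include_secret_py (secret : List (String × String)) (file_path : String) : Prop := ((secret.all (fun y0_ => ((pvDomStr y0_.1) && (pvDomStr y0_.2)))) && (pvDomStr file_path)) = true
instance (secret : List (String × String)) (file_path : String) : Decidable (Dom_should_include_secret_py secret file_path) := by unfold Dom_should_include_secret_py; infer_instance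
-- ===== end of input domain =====

-- B drops A's dead allowlist branches and finds the exclusion markers with one
-- left-to-right positional scan of the lowered path instead of five separate
-- whole-string containment searches (objective: alternative; same exact value).


-- ===== PORT A =====
def should_include_secret_py (secret : List (String × String)) (file_path : String) : Bool :=
  let secret_type := PySem.Dict.getD (PySem.Dict.mk secret) "type" ""
  let high_value_types := ["Private Key", "AWS Access Key", "GitHub Token", "JWT Token"]
  if high_value_types.contains secret_type then
    true
  else if secret_type == "Secret Keyword" then
    if ["test_", "mock_", "example_only", "demo_data", "fixture_"].any
        (fun pattern => PySem.Str.isIn pattern (PySem.Str.lower file_path)) then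
      false
    else if ["pygoat", "nodegoat", "sql-vulns"].any (fun app => PySem.Str.isIn app file_path) then
      true
    else
      true
  else
    true

-- ===== PORT B =====
-- Source B's loop 'for i in range(len(path)): if path.startswith(markers, i): return False'
-- transcribed as a structural recursion over the successive suffixes of the path.
def markerScan (markers : List (List Char)) : List Char → Bool
  | [] => false
  | c :: rest =>
      if markers.any (fun m => PySem.Chars.startswith (c :: rest) m) then true
      else markerScan markers rest

def should_include_secret_py_alt (secret : List (String × String)) (file_path : String) : Bool :=
  if PySem.Dict.getD (PySem.Dict.mk secret) "type" "" ≠ "Secret Keyword" then true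
  else
    let markers := ["test_", "mock_", "example_only", "demo_data", "fixture_"].map String.toList
    !(markerScan markers (PySem.Str.lower file_path).toList)

-- ===== PRECONDITION & SPEC =====
def Spec_should_include_secret_py (secret : List (String × String)) (file_path : String) (out : Bool) : Prop := out = should_include_secret_py_alt secret file_path
instance (secret : List (String × String)) (file_path : String) (out : Bool) : Decidable (Spec_should_include_secret_py secret file_path out) := by unfold Spec_should_include_secret_py; infer_instance

-- ===== CLAIM =====
def Claim_equal_should_include_secret_py : Prop := ∀ (secret : List (String × String)) (file_path : String), Dom_should_include_secret_py secret file_path → Spec_should_include_secret_py secret file_path (should_include_secret_py secret file_path)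

-- ===== LEMMAS AND PROOFS =====

-- The positional scan finds a marker iff some marker is a prefix of some suffix
-- (markers must be nonempty, so the empty suffix never matters).
theorem markerScan_iff (markers : List (List Char)) (hne : ∀ m ∈ markers, m ≠ []) :
    ∀ cs : List Char, markerScan markers cs = true ↔ ∃ m ∈ markers, ∃ j, m <+: cs.drop j := by
  intro cs
  induction cs with
  | nil =>
      simp only [markerScan, List.drop_nil]
      constructor
      · intro h; exact absurd h (by simp)
      · rintro ⟨m, hm, j, hpre⟩
        exact absurd (List.prefix_nil.mp hpre) (hne m hm)
  | cons c rest ih =>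
      simp only [markerScan]
      by_cases h : markers.any (fun m => PySem.Chars.startswith (c :: rest) m) = true
      · simp only [h, if_true, true_iff]
        obtain ⟨m, hm, hsw⟩ := List.any_eq_true.mp h
        exact ⟨m, hm, 0, by simpa using (PySem.Chars.startswith_iff _ _).mp hsw⟩
      · rw [if_neg h, ih]
        constructor
        · rintro ⟨m, hm, j, hpre⟩
          exact ⟨m, hm, j + 1, by simpa using hpre⟩
        · rintro ⟨m, hm, j, hpre⟩
          cases j with
          | zero =>
              exfalso; apply h
              exact List.any_eq_true.mpr ⟨m, hm, (PySem.Chars.startswith_iff _ _).mpr (by simpa using hpre)⟩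
          | succ j => exact ⟨m, hm, j, by simpa using hpre⟩

theorem markerScan_eq_any_isIn (cs : List Char) :
    markerScan (["test_", "mock_", "example_only", "demo_data", "fixture_"].map String.toList) cs
      = ["test_", "mock_", "example_only", "demo_data", "fixture_"].any
          (fun p => PySem.Chars.isIn p.toList cs) := by
  have hne : ∀ m ∈ (["test_", "mock_", "example_only", "demo_data", "fixture_"].map String.toList), m ≠ [] := by
    decide
  have hiff := markerScan_iff _ hne cs
  have h2 : (∃ m ∈ (["test_", "mock_", "example_only", "demo_data", "fixture_"].map String.toList), ∃ j, m <+: cs.drop j)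
      ↔ (["test_", "mock_", "example_only", "demo_data", "fixture_"].any
          (fun p => PySem.Chars.isIn p.toList cs) = true) := by
    simp only [List.mem_map, List.any_eq_true]
    constructor
    · rintro ⟨m, ⟨p, hp, rfl⟩, j, hpre⟩
      exact ⟨p, hp, (PySem.Chars.exists_prefix_drop_iff_isIn _ _).mp ⟨j, hpre⟩⟩
    · rintro ⟨p, hp, hin⟩
      obtain ⟨j, hpre⟩ := (PySem.Chars.exists_prefix_drop_iff_isIn _ _).mpr hin
      exact ⟨p.toList, ⟨p, hp, rfl⟩, j, hpre⟩
  exact Bool.eq_iff_iff.mpr (hiff.trans h2)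

-- ===== VERDICT =====
theorem should_include_secret_py_spec : Claim_equal_should_include_secret_py := by
  intro secret file_path _
  unfold Spec_should_include_secret_py
  simp only [should_include_secret_py, should_include_secret_py_alt,
    markerScan_eq_any_isIn, PySem.Str.isIn_eq, PySem.Str.toList_lower]
  by_cases hty : PySem.Dict.getD (PySem.Dict.mk secret) "type" "" = "Secret Keyword"
  · simp [hty]
  · simp [hty]
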